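-- pv_equiv track=rewrite | github.com/kifarid/Visual-latent-reasoning | data/create_vds_splits.py | _coalesce_runs
-- ===== SOURCE A (Python) =====
-- from collections import defaultdict
-- from typing import Dict, Iterable, List, Tuple
--
-- def _coalesce_runs(items: List[Tuple[int, int]]) -> Dict[int, List[Tuple[int, int, int]]]:
--     """Group (source_idx, pos) pairs into contiguous runs per source.
--
--     Returns: source_idx -> list of (src_start, dst_start, length)
--     """
--     runs: Dict[int, List[Tuple[int, int, int]]] = defaultdict(list)
--     if not items:
--         return runs
--     # We assume items are in desired output order; coalesce per-source consecutive positions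
--     dst = 0
--     i = 0
--     n = len(items)
--     while i < n:
--         si, pos = items[i]
--         src_start = pos
--         dst_start = dst
--         length = 1
--         i += 1
--         dst += 1
--         while i < n and items[i][0] == si and items[i][1] == (pos + length):
--             length += 1
--             i += 1
--             dst += 1
--         runs[si].append((src_start, dst_start, length))
--     return runs
-- ===== SOURCE B (Python) =====
-- from collections import defaultdict
-- from typing import Dict, List, Tuple
--
-- def _coalesce_runs(items: List[Tuple[int, int]]) -> Dict[int, List[Tuple[int, int, int]]]:
--     """Group (source_idx, pos) pairs into contiguous runs per source.
--
--     Staged index-based algorithm: pass 1 computes the list of run-start indices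
--     by comparing each item with its predecessor; pass 2 emits one run per pair
--     of consecutive start indices.  No running dst counter is needed: dst
--     advances exactly once per item, so a run's dst_start equals its start index.
--     """
--     runs: Dict[int, List[Tuple[int, int, int]]] = defaultdict(list)
--     n = len(items)
--     starts = [i for i in range(n)
--               if i == 0 or items[i][0] != items[i - 1][0] or items[i][1] != items[i - 1][1] + 1]
--     for b, e in zip(starts, starts[1:] + [n]):
--         runs[items[b][0]].append((items[b][1], b, e - b))
--     return runs
-- ===== Notes on version B (the rewrite author's own statement) =====
-- stated objective: alternative
-- what changed: Replaced A's stateful nested outer/inner while loops by two staged passes: pass 1 computes the list of run-start indices by comparing each item with its predecessor, pass 2 emits one run per consecutive pair of start indices, exploiting that dst advances once per item so dst_start equals the run's start index (no dst counter at all).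
import Mathlib
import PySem

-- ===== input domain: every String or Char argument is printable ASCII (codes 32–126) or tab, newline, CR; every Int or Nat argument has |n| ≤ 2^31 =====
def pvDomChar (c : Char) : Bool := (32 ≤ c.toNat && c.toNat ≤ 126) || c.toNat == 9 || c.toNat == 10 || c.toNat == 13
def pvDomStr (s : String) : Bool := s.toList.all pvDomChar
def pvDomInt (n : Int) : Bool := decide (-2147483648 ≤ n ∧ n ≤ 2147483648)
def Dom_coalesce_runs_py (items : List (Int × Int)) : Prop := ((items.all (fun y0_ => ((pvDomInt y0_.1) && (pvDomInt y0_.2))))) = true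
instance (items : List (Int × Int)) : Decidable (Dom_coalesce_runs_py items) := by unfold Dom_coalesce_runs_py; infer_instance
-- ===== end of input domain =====

-- B replaces A's nested-while coalescing loop by two staged passes: pass 1 computes the
-- list of run-start indices (each item compared with its predecessor), pass 2 emits one
-- run per consecutive pair of start indices, with dst_start = start index instead of a
-- running dst counter; objective: alternative decomposition, same O(n) cost.


-- ===== PORT A =====
-- inner while: extend the run while the next item is the same source at the consecutive position
def pvInnerA (si pos len : Int) (rest : List (Int × Int)) : Int × List (Int × Int) :=
  match rest with
  | [] => (len, [])
  | (s, p) :: t =>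
    if s == si && p == pos + len then pvInnerA si pos (len + 1) t
    else (len, (s, p) :: t)

theorem pvInnerA_len (si pos len : Int) (rest : List (Int × Int)) :
    (pvInnerA si pos len rest).2.length ≤ rest.length := by
  induction rest generalizing len with
  | nil => simp [pvInnerA]
  | cons hd t ih =>
    obtain ⟨s, p⟩ := hd
    simp only [pvInnerA]
    split
    · exact le_trans (ih (len + 1)) (Nat.le_succ _)
    · simp

-- outer while: start a run at the current item, run the inner loop, append to runs[si]
def pvOuterA (runs : PySem.Dict Int (List (Int × Int × Int))) (dst : Int)
    (rest : List (Int × Int)) : PySem.Dict Int (List (Int × Int × Int)) :=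
  match rest with
  | [] => runs
  | (si, pos) :: t =>
    let r := pvInnerA si pos 1 t
    pvOuterA (runs.modify si [] (· ++ [(pos, dst, r.1)])) (dst + r.1) r.2
termination_by rest.length
decreasing_by
  simpa using Nat.lt_succ_of_le (pvInnerA_len si pos 1 t)

def coalesce_runs_py (items : List (Int × Int)) : List (Int × List (Int × Int × Int)) :=
  match items with
  | [] => []                                  -- 'if not items: return runs' (empty defaultdict)
  | _ :: _ => (pvOuterA PySem.Dict.empty 0 items).items

-- ===== PORT B =====
-- pass 1 predicate: does a new run begin at index i?  (the default (0,0) is never used: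
-- every i drawn from range(n) and, for i ≠ 0, i-1 are valid indices, exactly as in Source B)
def pvBrkB (items : List (Int × Int)) (i : Nat) : Bool :=
  i == 0 || !((items.getD i (0, 0)).1 == (items.getD (i - 1) (0, 0)).1)
         || !((items.getD i (0, 0)).2 == (items.getD (i - 1) (0, 0)).2 + 1)

-- pass 1: the list comprehension '[i for i in range(n) if …]'
def pvStartsB (items : List (Int × Int)) : List Nat :=
  (List.range items.length).filter (pvBrkB items)

-- pass 2: 'for b, e in zip(starts, starts[1:] + [n]): runs[items[b][0]].append(…)'
def coalesce_runs_py_alt (items : List (Int × Int)) : List (Int × List (Int × Int × Int)) :=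
  let starts := pvStartsB items
  ((starts.zip (starts.drop 1 ++ [items.length])).foldl
    (fun runs be =>
      runs.modify (items.getD be.1 (0, 0)).1 []
        (· ++ [((items.getD be.1 (0, 0)).2, (be.1 : Int), ((be.2 : Int) - (be.1 : Int)))]))
    PySem.Dict.empty).items

-- ===== PRECONDITION & SPEC =====
def Spec_coalesce_runs_py (items : List (Int × Int)) (out : List (Int × List (Int × Int × Int))) : Prop := out = coalesce_runs_py_alt items
instance (items : List (Int × Int)) (out : List (Int × List (Int × Int × Int))) : Decidable (Spec_coalesce_runs_py items out) := by unfold Spec_coalesce_runs_py; infer_instance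

-- ===== CLAIM (what is proved, stated in full; the proofs are below) =====
def Claim_equal_coalesce_runs_py : Prop := ∀ (items : List (Int × Int)), Dom_coalesce_runs_py items → Spec_coalesce_runs_py items (coalesce_runs_py items)

-- ===== LEMMAS AND PROOFS =====

-- B's pass-2 fold over a list's start pairs, with every emitted dst index shifted by `off`
def pvEmitF (items : List (Int × Int)) (off : Nat)
    (d : PySem.Dict Int (List (Int × Int × Int))) : PySem.Dict Int (List (Int × Int × Int)) :=
  ((pvStartsB items).zip ((pvStartsB items).drop 1 ++ [items.length])).foldl
    (fun runs be =>
      runs.modify (items.getD be.1 (0, 0)).1 []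
        (· ++ [((items.getD be.1 (0, 0)).2, ((be.1 + off : Nat) : Int),
                ((be.2 : Int) - (be.1 : Int)))]))
    d

-- A's inner loop consumes exactly the maximal arithmetic run (si, pos+len), (si, pos+len+1), …
theorem pvInnerA_decomp (t : List (Int × Int)) (si pos : Int) : ∀ len : Int,
    ∃ c : Nat, (pvInnerA si pos len t).1 = len + (c : Int) ∧
      t = (List.range c).map (fun (k : Nat) => (si, pos + len + (k : Int))) ++ (pvInnerA si pos len t).2 ∧
      (∀ s p, (pvInnerA si pos len t).2.head? = some (s, p) → ¬(s = si ∧ p = pos + len + (c : Int))) := by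
  induction t with
  | nil => intro len; exact ⟨0, by simp [pvInnerA]⟩
  | cons hd t ih =>
    intro len
    obtain ⟨s, p⟩ := hd
    by_cases h : (s == si && p == pos + len) = true
    · simp only [Bool.and_eq_true, beq_iff_eq] at h
      obtain ⟨hs, hp⟩ := h
      subst hs hp
      have heq : pvInnerA s pos len ((s, pos + len) :: t) = pvInnerA s pos (len + 1) t := by
        simp [pvInnerA]
      obtain ⟨c, h1, h2, h3⟩ := ih (len + 1)
      refine ⟨c + 1, ?_, ?_, ?_⟩
      · rw [heq, h1]; push_cast; ring
      · rw [heq, List.range_succ_eq_map, List.map_cons, List.map_map, List.cons_append]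
        set R := (pvInnerA s pos (len + 1) t).2 with hR
        refine List.cons_eq_cons.mpr ⟨by norm_num, ?_⟩
        rw [h2]
        congr 1
        apply List.map_congr_left
        intro k _
        simp only [Function.comp_apply, Nat.succ_eq_add_one, Prod.mk.injEq, true_and]
        push_cast; ring
      · intro s' p' hh
        rw [heq] at hh
        have := h3 s' p' hh
        rintro ⟨e1, e2⟩; exact this ⟨e1, by push_cast at e2 ⊢; omega⟩
    · have heq : pvInnerA si pos len ((s, p) :: t) = (len, (s, p) :: t) := by
        simp only [pvInnerA, h, Bool.false_eq_true, if_false]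
      refine ⟨0, by rw [heq]; simp, by rw [heq]; simp, ?_⟩
      intro s' p' hh
      rw [heq] at hh
      simp only [List.head?_cons, Option.some.injEq, Prod.mk.injEq] at hh
      rintro ⟨e1, e2⟩
      apply h
      obtain ⟨hs, hp⟩ := hh
      subst hs hp
      simp only [Bool.and_eq_true, beq_iff_eq]
      exact ⟨e1, by push_cast at e2; omega⟩

-- getD on the run prefix (range m).map (fun k => (si, pos + k))
theorem pvCF_getD (si pos : Int) (m i : Nat) (hi : i < m) :
    ((List.range m).map (fun (k : Nat) => (si, pos + (k : Int)))).getD i (0, 0) = (si, pos + (i : Int)) := by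
  rw [List.getD_eq_getElem?_getD, List.getElem?_map, List.getElem?_range hi]
  rfl

-- getD past a prefix of length m
theorem pvGetD_shift (CF rest : List (Int × Int)) (j : Nat) (d : Int × Int) :
    (CF ++ rest).getD (j + CF.length) d = rest.getD j d := by
  rw [List.getD_append_right _ _ _ _ (Nat.le_add_left _ _)]
  congr 1
  omega

-- pass 1 on (run prefix ++ rest): start 0, then the starts of rest shifted by m
theorem pvStartsB_decomp (si pos : Int) (m : Nat) (hm : 0 < m) (rest : List (Int × Int))
    (hstop : ∀ s p, rest.head? = some (s, p) → ¬(s = si ∧ p = pos + (m : Int))) :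
    pvStartsB ((List.range m).map (fun (k : Nat) => (si, pos + (k : Int))) ++ rest)
      = 0 :: (pvStartsB rest).map (· + m) := by
  set CF : List (Int × Int) := (List.range m).map (fun (k : Nat) => (si, pos + (k : Int))) with hCF
  have hlenCF : CF.length = m := by simp [hCF]
  have hlen : (CF ++ rest).length = m + rest.length := by simp [hlenCF]
  unfold pvStartsB
  rw [hlen, List.range_add, List.filter_append]
  have hpart1 : (List.range m).filter (pvBrkB (CF ++ rest)) = [0] := by
    obtain ⟨m', rfl⟩ : ∃ m', m = m' + 1 := ⟨m - 1, by omega⟩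
    rw [List.range_succ_eq_map]
    rw [List.filter_cons_of_pos (by simp [pvBrkB])]
    have hnil : (List.filter (pvBrkB (CF ++ rest)) (List.map Nat.succ (List.range m'))) = [] := by
      rw [List.filter_eq_nil_iff]
      intro a ha
      simp only [List.mem_map, List.mem_range] at ha
      obtain ⟨k, hk, rfl⟩ := ha
      have g1 : (CF ++ rest).getD (k + 1) (0, 0) = (si, pos + ((k + 1 : Nat) : Int)) := by
        rw [List.getD_append _ _ _ _ (by omega : k + 1 < CF.length), hCF, pvCF_getD _ _ _ _ (by omega)]
      have g0 : (CF ++ rest).getD k (0, 0) = (si, pos + (k : Int)) := by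
        rw [List.getD_append _ _ _ _ (by omega : k < CF.length), hCF, pvCF_getD _ _ _ _ (by omega)]
      simp only [pvBrkB, Nat.succ_eq_add_one, Nat.add_sub_cancel, g1, g0]
      simp only [Bool.or_eq_true, beq_iff_eq, Bool.not_eq_eq_eq_not, Bool.not_true, not_or]
      push_cast
      simp
      omega
    rw [hnil]
  have hpart2 : (List.map (fun x => m + x) (List.range rest.length)).filter (pvBrkB (CF ++ rest))
      = (pvStartsB rest).map (· + m) := by
    have hmc : (List.map (fun x => m + x) (List.range rest.length))
        = (List.range rest.length).map (· + m) := by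
      apply List.map_congr_left; intro a _; omega
    rw [hmc, List.filter_map]
    unfold pvStartsB
    congr 1
    apply List.filter_congr
    intro j hj
    simp only [List.mem_range] at hj
    simp only [Function.comp_apply]
    match j with
    | 0 =>
      obtain ⟨r0, rest', rfl⟩ : ∃ r0 rest', rest = r0 :: rest' := by
        cases rest with
        | nil => simp at hj
        | cons a l => exact ⟨a, l, rfl⟩
      rw [Nat.zero_add]
      have g1 : (CF ++ r0 :: rest').getD m (0, 0) = r0 := by
        have h := pvGetD_shift CF (r0 :: rest') 0 (0, 0)
        rw [hlenCF] at h
        simpa using h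
      have g0 : (CF ++ r0 :: rest').getD (m - 1) (0, 0) = (si, pos + ((m - 1 : Nat) : Int)) := by
        rw [List.getD_append _ _ _ _ (by omega : m - 1 < CF.length), hCF,
          pvCF_getD _ _ _ _ (by omega)]
      have hst := hstop r0.1 r0.2 (by simp)
      rw [show pvBrkB (r0 :: rest') 0 = true from by simp [pvBrkB]]
      simp only [pvBrkB, g1, g0]
      have hm0 : (m == 0) = false := by simp; omega
      rw [hm0]
      have hcast : pos + ((m - 1 : Nat) : Int) + 1 = pos + (m : Int) := by
        push_cast [Nat.cast_sub (by omega : 1 ≤ m)]; ring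
      rw [hcast]
      simp only [Bool.false_or, Bool.or_eq_true, Bool.not_eq_true', beq_eq_false_iff_ne, ne_eq]
      tauto
    | Nat.succ k =>
      have g1 : (CF ++ rest).getD (k + 1 + m) (0, 0) = rest.getD (k + 1) (0, 0) := by
        rw [← hlenCF, pvGetD_shift]
      have g0 : (CF ++ rest).getD (k + 1 + m - 1) (0, 0) = rest.getD (k + 1 - 1) (0, 0) := by
        have e : k + 1 + m - 1 = k + CF.length := by omega
        rw [e, pvGetD_shift]
        rfl
      simp only [pvBrkB, g1, g0]
      have e1 : (k + 1 + m == 0) = false := by simp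
      have e2 : (k + 1 == 0) = false := by simp
      rw [e1, e2]
  rw [hpart1, hpart2]
  rfl

-- shifting every start by m shifts the zipped (b, e) pairs componentwise
theorem pvZip_shift (S : List Nat) (m n' : Nat) :
    (S.map (· + m)).zip ((S.map (· + m)).drop 1 ++ [n' + m])
      = (S.zip (S.drop 1 ++ [n'])).map (fun be => (be.1 + m, be.2 + m)) := by
  have hdrop : (S.map (· + m)).drop 1 = (S.drop 1).map (· + m) := by
    cases S <;> simp
  have hsing : ([n' + m] : List Nat) = [n'].map (· + m) := by simp
  rw [hdrop, hsing, ← List.map_append, List.zip_map]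
  rfl

-- the first element of each nonempty starts list is 0
theorem pvStartsB_cons (a : Int × Int) (l : List (Int × Int)) :
    ∃ S2, pvStartsB (a :: l) = 0 :: S2 := by
  unfold pvStartsB
  rw [List.length_cons, List.range_succ_eq_map,
    List.filter_cons_of_pos (by simp [pvBrkB])]
  exact ⟨_, rfl⟩

-- one outer step of A corresponds, on B's side, to emitting the first run and shifting
theorem pvEmitF_step (si pos : Int) (m : Nat) (hm : 0 < m) (rest : List (Int × Int))
    (off : Nat) (d : PySem.Dict Int (List (Int × Int × Int)))
    (hstop : ∀ s p, rest.head? = some (s, p) → ¬(s = si ∧ p = pos + (m : Int))) :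
    pvEmitF ((List.range m).map (fun (k : Nat) => (si, pos + (k : Int))) ++ rest) off d
      = pvEmitF rest (off + m) (d.modify si [] (· ++ [(pos, (off : Int), (m : Int))])) := by
  set CF : List (Int × Int) := (List.range m).map (fun (k : Nat) => (si, pos + (k : Int))) with hCF
  have hlenCF : CF.length = m := by simp [hCF]
  have hlen : (CF ++ rest).length = rest.length + m := by simp [hlenCF]; omega
  have hstarts := pvStartsB_decomp si pos m hm rest hstop
  have hget0 : (CF ++ rest).getD 0 (0, 0) = (si, pos) := by
    rw [List.getD_append _ _ _ _ (by omega : 0 < CF.length), hCF, pvCF_getD _ _ _ _ hm]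
    norm_num
  have hgetshift : ∀ (b : Nat), (CF ++ rest).getD (b + m) (0, 0) = rest.getD b (0, 0) := by
    intro b; rw [← hlenCF, pvGetD_shift]
  unfold pvEmitF
  rw [hstarts, hlen]
  cases hrest : rest with
  | nil =>
    subst hrest
    simp only [pvStartsB, List.length_nil, List.range_zero, List.filter_nil, List.map_nil,
      List.drop_succ_cons, List.drop_nil, List.nil_append, List.zip_cons_cons, List.zip_nil_right,
      List.foldl_cons, List.foldl_nil, List.zip_nil_left]
    rw [hget0]
    norm_num
  | cons r0 rest' =>
    obtain ⟨S2, hS2⟩ := pvStartsB_cons r0 rest'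
    rw [← hrest] at hS2 ⊢
    rw [hS2]
    simp only [List.map_cons, List.drop_succ_cons, List.drop_zero, List.cons_append,
      List.zip_cons_cons, List.foldl_cons]
    rw [hget0]
    have hzip := pvZip_shift (0 :: S2) m rest.length
    simp only [List.map_cons, List.drop_succ_cons, List.drop_zero, Nat.zero_add] at hzip
    simp only [Nat.zero_add, Nat.cast_zero, sub_zero]
    rw [hzip, List.foldl_map]
    congr 1
    funext runs be
    simp only []
    rw [hgetshift be.1]
    have e1 : ((be.1 + m + off : Nat) : Int) = ((be.1 + (off + m) : Nat) : Int) := by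
      push_cast; ring
    have e2 : ((be.2 + m : Nat) : Int) - ((be.1 + m : Nat) : Int)
        = ((be.2 : Nat) : Int) - ((be.1 : Nat) : Int) := by push_cast; ring
    rw [e1, e2]

theorem pvMainAux : ∀ (N : Nat) (items : List (Int × Int)), items.length ≤ N →
    ∀ (d : PySem.Dict Int (List (Int × Int × Int))) (off : Nat),
      pvOuterA d (off : Int) items = pvEmitF items off d := by
  intro N
  induction N with
  | zero =>
    intro items hlen d off
    have : items = [] := List.eq_nil_of_length_eq_zero (by omega)
    subst this
    simp [pvOuterA, pvEmitF, pvStartsB]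
  | succ N ih =>
    intro items hlen d off
    match items with
    | [] => simp [pvOuterA, pvEmitF, pvStartsB]
    | (si, pos) :: t =>
      obtain ⟨c, h1, h2, h3⟩ := pvInnerA_decomp t si pos 1
      set R := (pvInnerA si pos 1 t).2 with hR
      have hitems : (si, pos) :: t
          = (List.range (c + 1)).map (fun (k : Nat) => (si, pos + (k : Int))) ++ R := by
        rw [List.range_succ_eq_map, List.map_cons, List.map_map, List.cons_append]
        refine List.cons_eq_cons.mpr ⟨by norm_num, ?_⟩
        rw [h2]
        congr 1
        apply List.map_congr_left
        intro k _
        simp only [Function.comp_apply, Nat.succ_eq_add_one, Prod.mk.injEq, true_and]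
        push_cast; ring
      have hstop : ∀ s p, R.head? = some (s, p)
          → ¬(s = si ∧ p = pos + ((c + 1 : Nat) : Int)) := by
        intro s p hh
        have := h3 s p hh
        rintro ⟨e1, e2⟩
        exact this ⟨e1, by push_cast at e2 ⊢; omega⟩
      have hrlen : R.length ≤ N := by
        have h2l := congrArg List.length h2
        simp only [List.length_append, List.length_map, List.length_range] at h2l
        simp only [List.length_cons] at hlen
        omega
      have hA : pvOuterA d (off : Int) ((si, pos) :: t)
          = pvOuterA (d.modify si [] (· ++ [(pos, (off : Int), (pvInnerA si pos 1 t).1)]))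
              ((off : Int) + (pvInnerA si pos 1 t).1) R := by
        rw [pvOuterA]
      rw [hA]
      have hLm : (pvInnerA si pos 1 t).1 = ((c + 1 : Nat) : Int) := by
        rw [h1]; push_cast; ring
      rw [hLm]
      have hoff : (off : Int) + ((c + 1 : Nat) : Int) = ((off + (c + 1) : Nat) : Int) := by
        push_cast; ring
      rw [hoff, ih R hrlen _ (off + (c + 1))]
      rw [hitems]
      rw [pvEmitF_step si pos (c + 1) (by omega) R off d hstop]

-- ===== VERDICT (by name: the statement is the Claim_ definition above) =====
theorem coalesce_runs_py_spec : Claim_equal_coalesce_runs_py := by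
  intro items _
  unfold Spec_coalesce_runs_py coalesce_runs_py coalesce_runs_py_alt
  match items with
  | [] => simp [pvStartsB, PySem.Dict.empty]
  | (si, pos) :: t =>
    have h := pvMainAux ((si, pos) :: t).length ((si, pos) :: t) le_rfl PySem.Dict.empty 0
    simp only [Nat.cast_zero] at h
    rw [h]
    unfold pvEmitF
    rfl
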